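-- pv_equiv track=rewrite | github.com/evildarkarchon/Scanner111 | Python/CLASSIC_ScanLogs.py | scan_log_gpu
-- ===== SOURCE A (Python) =====
-- from typing import Literal
--
-- def scan_log_gpu(segment_system: list[str]) -> tuple[str, Literal["nvidia", "amd"] | None]:
--     """
--     Scans the log to determine the GPU information and its rival.
--
--     This method analyzes a list of system log segments to identify the primary
--     graphics processing unit (GPU) being used. It also determines the rival GPU
--     manufacturer based on the GPU identified. If the GPU information cannot be
--     determined, the method returns "Unknown" and the rival GPU is set to None.
--
--     Args:
--         segment_system (list[str]): A list of log segments containing system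
--             information. Each log segment is expected to contain details about
--             hardware components including GPUs.
--
--     Returns:
--         tuple[str, Literal["nvidia", "amd"] | None]: A tuple containing the GPU
--             name and the rival GPU manufacturer. The first element is a string
--             that represents the GPU name ("AMD", "Nvidia", or "Unknown"). The
--             second element is a Literal that specifies the rival GPU
--             manufacturer ("nvidia", "amd"), or None if no rival is identified.
--     """
--     gpu: str
--     gpu_rival: Literal["nvidia", "amd"] | None
--     if any("GPU #1" in elem and "AMD" in elem for elem in segment_system):
--         gpu = "AMD"
--         gpu_rival = "nvidia"
--     elif any("GPU #1" in elem and "Nvidia" in elem for elem in segment_system):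
--         gpu = "Nvidia"
--         gpu_rival = "amd"
--     else:
--         gpu = "Unknown"
--         gpu_rival = None
--     return gpu, gpu_rival
-- ===== SOURCE B (Python) =====
-- def scan_log_gpu(segment_system):
--     has_amd = False
--     has_nvidia = False
--     for elem in segment_system:
--         if "GPU #1" in elem:
--             if "AMD" in elem:
--                 has_amd = True
--             if "Nvidia" in elem:
--                 has_nvidia = True
--     if has_amd:
--         return "AMD", "nvidia"
--     if has_nvidia:
--         return "Nvidia", "amd"
--     return "Unknown", None
-- ===== Notes on version B (the rewrite author's own statement) =====
-- stated objective: alternative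
-- what changed: B replaces A's two separate short-circuiting any() scans by a single loop over segment_system maintaining two boolean flags, deciding AMD-before-Nvidia after the loop.
import Mathlib
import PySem

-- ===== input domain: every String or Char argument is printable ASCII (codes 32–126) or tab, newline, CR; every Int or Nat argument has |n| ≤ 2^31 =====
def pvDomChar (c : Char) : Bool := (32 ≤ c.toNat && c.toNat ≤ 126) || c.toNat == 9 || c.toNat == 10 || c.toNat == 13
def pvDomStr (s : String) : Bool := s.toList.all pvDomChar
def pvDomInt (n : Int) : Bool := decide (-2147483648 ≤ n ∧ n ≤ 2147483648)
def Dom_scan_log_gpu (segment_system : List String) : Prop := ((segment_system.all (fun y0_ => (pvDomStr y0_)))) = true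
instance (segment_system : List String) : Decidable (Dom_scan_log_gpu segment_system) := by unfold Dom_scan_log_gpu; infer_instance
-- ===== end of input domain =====

-- B replaces A's two separate any() scans by one loop maintaining two boolean flags; same O(n) cost, different decomposition.


-- ===== PORT A =====
def scan_log_gpu (segment_system : List String) : String × Option String :=
  if segment_system.any (fun elem => PySem.Str.isIn "GPU #1" elem && PySem.Str.isIn "AMD" elem) then
    ("AMD", some "nvidia")
  else if segment_system.any (fun elem => PySem.Str.isIn "GPU #1" elem && PySem.Str.isIn "Nvidia" elem) then
    ("Nvidia", some "amd")
  else
    ("Unknown", none)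

-- ===== PORT B =====
def scan_log_gpu_alt (segment_system : List String) : String × Option String :=
  let flags := segment_system.foldl
    (fun (st : Bool × Bool) elem =>
      if PySem.Str.isIn "GPU #1" elem then
        ((if PySem.Str.isIn "AMD" elem then true else st.1),
         (if PySem.Str.isIn "Nvidia" elem then true else st.2))
      else st)
    (false, false)
  if flags.1 then ("AMD", some "nvidia")
  else if flags.2 then ("Nvidia", some "amd")
  else ("Unknown", none)

-- ===== PRECONDITION & SPEC =====
def Spec_scan_log_gpu (segment_system : List String) (out : String × Option String) : Prop := out = scan_log_gpu_alt segment_system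
instance (segment_system : List String) (out : String × Option String) : Decidable (Spec_scan_log_gpu segment_system out) := by unfold Spec_scan_log_gpu; infer_instance

-- ===== CLAIM (what is proved, stated in full; the proofs are below) =====
def Claim_equal_scan_log_gpu : Prop := ∀ (segment_system : List String), Dom_scan_log_gpu segment_system → Spec_scan_log_gpu segment_system (scan_log_gpu segment_system)

-- ===== LEMMAS AND PROOFS =====

-- B's flag fold computes exactly the two any-scans of A, ORed with the starting flags.
theorem flags_eq_any (xs : List String) (a n : Bool) :
    xs.foldl
      (fun (st : Bool × Bool) elem =>
        if PySem.Str.isIn "GPU #1" elem then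
          ((if PySem.Str.isIn "AMD" elem then true else st.1),
           (if PySem.Str.isIn "Nvidia" elem then true else st.2))
        else st)
      (a, n)
    = (a || xs.any (fun elem => PySem.Str.isIn "GPU #1" elem && PySem.Str.isIn "AMD" elem),
       n || xs.any (fun elem => PySem.Str.isIn "GPU #1" elem && PySem.Str.isIn "Nvidia" elem)) := by
  induction xs generalizing a n with
  | nil => simp
  | cons hd tl ih =>
    simp only [List.foldl_cons, List.any_cons]
    cases hg : PySem.Str.isIn "GPU #1" hd <;>
      simp only [hg, reduceIte, Bool.false_and, Bool.true_and, Bool.false_or] <;>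
      rw [ih] <;>
      cases PySem.Str.isIn "AMD" hd <;>
      cases PySem.Str.isIn "Nvidia" hd <;>
      simp [Bool.or_assoc, Bool.or_comm, Bool.or_left_comm]

-- ===== VERDICT (by name: the statement is the Claim_ definition above) =====
theorem scan_log_gpu_spec : Claim_equal_scan_log_gpu := by
  intro xs _
  unfold Spec_scan_log_gpu scan_log_gpu scan_log_gpu_alt
  simp only [flags_eq_any, Bool.false_or]
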